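-- pv_equiv track=rewrite | github.com/YashB63/GFG-Daily-Questions | Day 496/Satisfy the equation/satisfy_the_equation.py | satisfyEqn
-- ===== SOURCE A (Python) =====
-- from collections import defaultdict
--
-- def satisfyEqn(a, N):
--     map = defaultdict(list)
--     ans = 0
--     for i in range(len(a)):
--         for j in range(i+1,len(a)):
--             s = (a[i]+a[j])
--             if s in map:
--                 if map[s][0]!=i and map[s][1]!=j and map[s][0]!=j and map[s][1]!=i:
--                     temp = map[s][:2]+[i,j]
--                     if not ans or ans>temp:
--                         while map[s]:
--                             map[s].pop()
--                         map[s].extend(temp)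
--                         ans = map[s]
--             else:
--                 map[s].extend([i,j])
--     return ([-1,-1,-1,-1]) if not ans else ans
-- ===== SOURCE B (Python) =====
-- def satisfyEqn(a, N):
--     # Two-phase: first record, per pair-sum, only the FIRST index pair; then
--     # scan all pairs once more, forming candidates against that base pair.
--     n = len(a)
--     first = {}
--     for i in range(n):
--         for j in range(i + 1, n):
--             first.setdefault(a[i] + a[j], (i, j))
--     best = None
--     for i in range(n):
--         for j in range(i + 1, n):
--             p, q = first[a[i] + a[j]]
--             if p != i and p != j and q != i and q != j:
--                 cand = [p, q, i, j]
--                 if best is None or cand < best: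
--                     best = cand
--     return [-1, -1, -1, -1] if best is None else best
-- ===== Notes on version B (the rewrite author's own statement) =====
-- stated objective: simpler
-- what changed: A interleaves everything in one pass over index pairs, mutating a dict of growing lists in place and aliasing the running answer to a dict entry; B is two separate phases: build a dict of only the first index pair per pair-sum, then scan the pairs once more forming candidates against that fixed base pair and keeping the lexicographic minimum.
import Mathlib
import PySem

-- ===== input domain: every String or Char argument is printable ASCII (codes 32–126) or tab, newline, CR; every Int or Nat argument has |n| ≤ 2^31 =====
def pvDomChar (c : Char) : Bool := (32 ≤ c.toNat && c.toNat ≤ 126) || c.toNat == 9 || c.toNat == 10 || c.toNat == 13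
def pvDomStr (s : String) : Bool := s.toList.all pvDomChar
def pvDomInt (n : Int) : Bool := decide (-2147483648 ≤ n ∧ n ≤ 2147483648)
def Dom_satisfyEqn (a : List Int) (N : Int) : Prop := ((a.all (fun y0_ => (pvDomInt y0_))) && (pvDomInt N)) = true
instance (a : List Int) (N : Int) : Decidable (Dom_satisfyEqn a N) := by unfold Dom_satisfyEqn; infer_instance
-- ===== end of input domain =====

-- B replaces A's single pass with a mutating list-valued dict (and an aliased running
-- answer) by two phases: a dict holding only the FIRST pair per sum, then a candidate
-- scan keeping the lexicographic minimum; objective: simpler (no speed claim).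

-- Python's `<` on lists of ints (lexicographic, prefix is smaller); used by both ports.
def pyListLt : List Int → List Int → Bool
  | _, [] => false
  | [], _ :: _ => true
  | x :: xs, y :: ys => x < y || (x == y && pyListLt xs ys)

-- ===== PORT A =====
-- Literal port of A. `ans` starts as Python's 0, modelled as [] (a stored answer is
-- always a 4-element list, never []). `map[s]` is never empty when read, so the
-- indexings l[0], l[1] are ported with pyGetD (default never used). The in-place
-- pop/extend plus aliasing `ans = map[s]` is observationally `insert` + reassignment
-- (map[s] is only mutated at the moment ans is reassigned to it).
def satisfyEqn (a : List Int) (N : Int) : List Int :=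
  let n : Int := PySem.List.len a
  let st :=
    (PySem.List.pyRange 0 n 1).foldl (fun st i =>
      (PySem.List.pyRange (i+1) n 1).foldl (fun st j =>
        let d := st.1
        let ans := st.2
        let s := PySem.List.pyGetD a i 0 + PySem.List.pyGetD a j 0
        match d.get? s with
        | some l =>
          if PySem.List.pyGetD l 0 0 ≠ i ∧ PySem.List.pyGetD l 1 0 ≠ j ∧
             PySem.List.pyGetD l 0 0 ≠ j ∧ PySem.List.pyGetD l 1 0 ≠ i then
            let temp := PySem.List.slice l none (some 2) ++ [i, j]
            if ans = [] ∨ pyListLt temp ans then (d.insert s temp, temp) else (d, ans)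
          else (d, ans)
        | none => (d.insert s [i, j], st.2)) st)
      ((PySem.Dict.empty : PySem.Dict Int (List Int)), ([] : List Int))
  if st.2 = [] then [-1, -1, -1, -1] else st.2

-- ===== PORT B =====
-- Literal port of Source B: phase 1 builds `first` (sum ↦ first index pair) with
-- setdefault; phase 2 scans all pairs again keeping the smallest candidate.
-- `first[a[i]+a[j]]` can never raise (every pair's sum was inserted in phase 1),
-- so the lookup is ported with .getD (0, 0) (default never used).
def satisfyEqn_alt (a : List Int) (N : Int) : List Int :=
  let n : Int := PySem.List.len a
  let first :=
    (PySem.List.pyRange 0 n 1).foldl (fun d i =>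
      (PySem.List.pyRange (i+1) n 1).foldl (fun d j =>
        d.setdefault (PySem.List.pyGetD a i 0 + PySem.List.pyGetD a j 0) (i, j)) d)
      (PySem.Dict.empty : PySem.Dict Int (Int × Int))
  let best :=
    (PySem.List.pyRange 0 n 1).foldl (fun best i =>
      (PySem.List.pyRange (i+1) n 1).foldl (fun best j =>
        let pq := (first.get? (PySem.List.pyGetD a i 0 + PySem.List.pyGetD a j 0)).getD (0, 0)
        if pq.1 ≠ i ∧ pq.1 ≠ j ∧ pq.2 ≠ i ∧ pq.2 ≠ j then
          let cand := [pq.1, pq.2, i, j]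
          match best with
          | none => some cand
          | some b => if pyListLt cand b then some cand else some b
        else best) best)
      (none : Option (List Int))
  match best with
  | none => [-1, -1, -1, -1]
  | some b => b

-- ===== PRECONDITION & SPEC =====
def Spec_satisfyEqn (a : List Int) (N : Int) (out : List Int) : Prop := out = satisfyEqn_alt a N
instance (a : List Int) (N : Int) (out : List Int) : Decidable (Spec_satisfyEqn a N out) := by unfold Spec_satisfyEqn; infer_instance

-- ===== CLAIM (what is proved, stated in full; the proofs are below) =====
def Claim_equal_satisfyEqn : Prop := ∀ (a : List Int) (N : Int), Dom_satisfyEqn a N → Spec_satisfyEqn a N (satisfyEqn a N)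

-- ===== LEMMAS AND PROOFS =====

-- The sum keyed by an index pair.
def pvKey (a : List Int) (p : Int × Int) : Int :=
  PySem.List.pyGetD a p.1 0 + PySem.List.pyGetD a p.2 0

-- The pair stream both programs iterate over, flattened.
def pvPairs (a : List Int) : List (Int × Int) :=
  (PySem.List.pyRange 0 (PySem.List.len a) 1).flatMap
    (fun i => (PySem.List.pyRange (i+1) (PySem.List.len a) 1).map (fun j => (i, j)))

-- A's loop body as a step function on (dict, ans).
def pvStepA (a : List Int) (st : PySem.Dict Int (List Int) × List Int) (p : Int × Int) :
    PySem.Dict Int (List Int) × List Int :=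
  let d := st.1
  let ans := st.2
  let s := pvKey a p
  match d.get? s with
  | some l =>
    if PySem.List.pyGetD l 0 0 ≠ p.1 ∧ PySem.List.pyGetD l 1 0 ≠ p.2 ∧
       PySem.List.pyGetD l 0 0 ≠ p.2 ∧ PySem.List.pyGetD l 1 0 ≠ p.1 then
      let temp := PySem.List.slice l none (some 2) ++ [p.1, p.2]
      if ans = [] ∨ pyListLt temp ans then (d.insert s temp, temp) else (d, ans)
    else (d, ans)
  | none => (d.insert s [p.1, p.2], st.2)

-- B's phase-2 body as a step function, with the first-pair lookup abstracted as F.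
def pvStepB (a : List Int) (F : Int → Option (Int × Int)) (best : Option (List Int))
    (p : Int × Int) : Option (List Int) :=
  let pq := (F (pvKey a p)).getD (0, 0)
  if pq.1 ≠ p.1 ∧ pq.1 ≠ p.2 ∧ pq.2 ≠ p.1 ∧ pq.2 ≠ p.2 then
    let cand := [pq.1, pq.2, p.1, p.2]
    match best with
    | none => some cand
    | some b => if pyListLt cand b then some cand else some b
  else best

-- First pair with a given sum in a pair list.
def pvFirst (a : List Int) (u : List (Int × Int)) (s : Int) : Option (Int × Int) :=
  u.find? (fun p => pvKey a p == s)

-- ans ↔ best correspondence: Python's falsy 0 is [] / None.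
def pvToOpt (ans : List Int) : Option (List Int) := if ans = [] then none else some ans

-- Invariant tying A's dict to the first-pair map of the processed prefix.
def pvDInv (a : List Int) (u : List (Int × Int)) (d : PySem.Dict Int (List Int)) : Prop :=
  ∀ s, (pvFirst a u s = none → d.get? s = none) ∧
    ∀ pq, pvFirst a u s = some pq → ∃ r, d.get? s = some (pq.1 :: pq.2 :: r)

-- Nested range fold = fold over the flattened pair stream.
theorem pv_foldl_flat {σ : Type} (g : Int → List Int) (f : σ → Int × Int → σ) :
    ∀ (L : List Int) (init : σ),
      L.foldl (fun st i => (g i).foldl (fun st j => f st (i, j)) st) init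
        = (L.flatMap (fun i => (g i).map (fun j => (i, j)))).foldl f init := by
  intro L
  induction L with
  | nil => intro init; rfl
  | cons x xs ih =>
    intro init
    simp only [List.foldl_cons, List.flatMap_cons, List.foldl_append, List.foldl_map, ih]

-- Phase 1 of B computes pvFirst.
theorem pv_pass1 (a : List Int) :
    ∀ (l : List (Int × Int)) (d : PySem.Dict Int (Int × Int)) (s : Int),
      (l.foldl (fun d p => d.setdefault (pvKey a p) p) d).get? s
        = Option.or (d.get? s) (pvFirst a l s) := by
  intro l
  induction l with
  | nil => intro d s; simp [pvFirst, Option.or]; cases d.get? s <;> rfl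
  | cons p l ih =>
    intro d s
    simp only [List.foldl_cons, ih, pvFirst, List.find?_cons]
    by_cases h : pvKey a p = s
    · simp only [h, beq_self_eq_true]
      rw [show (d.setdefault s p).get? s = some ((d.get? s).getD p) from
        PySem.Dict.get?_setdefault_self d s p]
      cases d.get? s <;> rfl
    · have hne : s ≠ pvKey a p := fun hc => h hc.symm
      rw [PySem.Dict.get?_setdefault_of_ne d p hne]
      have : (pvKey a p == s) = false := by simp [h]
      rw [this]

-- pvFirst over an append / a cons.
theorem pvFirst_append (a : List Int) (u v : List (Int × Int)) (s : Int) :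
    pvFirst a (u ++ v) s = Option.or (pvFirst a u s) (pvFirst a v s) := by
  cases h : List.find? (fun p => pvKey a p == s) u <;>
    simp [pvFirst, List.find?_append, h, Option.or]

theorem pvFirst_cons (a : List Int) (p : Int × Int) (v : List (Int × Int)) (s : Int) :
    pvFirst a (p :: v) s = if pvKey a p = s then some p else pvFirst a v s := by
  by_cases h : pvKey a p = s
  · simp [pvFirst, h]
  · have hb : (pvKey a p == s) = false := by simp [h]
    simp [pvFirst, h]

-- One synchronised step: A's body preserves the dict invariant, and its effect on
-- ans matches B's body's effect on best.
theorem pv_step (a : List Int) (u v : List (Int × Int)) (p : Int × Int)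
    (st : PySem.Dict Int (List Int) × List Int) (h : pvDInv a u st.1) :
    pvDInv a (u ++ [p]) (pvStepA a st p).1 ∧
      pvToOpt ((pvStepA a st p).2)
        = pvStepB a (pvFirst a (u ++ p :: v)) (pvToOpt st.2) p := by
  have hself : pvFirst a (p :: v) (pvKey a p) = some p := by
    simp [pvFirst_cons]
  cases hf : pvFirst a u (pvKey a p) with
  | none =>
    have hd : st.1.get? (pvKey a p) = none := (h (pvKey a p)).1 hf
    have hA : pvStepA a st p = (st.1.insert (pvKey a p) [p.1, p.2], st.2) := by
      simp only [pvStepA, hd]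
    have hB : pvStepB a (pvFirst a (u ++ p :: v)) (pvToOpt st.2) p = pvToOpt st.2 := by
      simp only [pvStepB, pvFirst_append, hf, hself, Option.or]
      simp
    refine ⟨?_, by rw [hA, hB]⟩
    rw [hA]
    have hfp : pvFirst a (u ++ [p]) (pvKey a p) = some p := by
      rw [pvFirst_append, hf, pvFirst_cons]
      simp [Option.or]
    intro s'
    by_cases hs : s' = pvKey a p
    · subst hs
      rw [hfp]
      refine ⟨?_, ?_⟩
      · intro hc; cases hc
      intro pq hpq
      obtain rfl : p = pq := by injection hpq
      exact ⟨[], by rw [PySem.Dict.get?_insert]; simp⟩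
    · have hfirst : pvFirst a (u ++ [p]) s' = pvFirst a u s' := by
        rw [pvFirst_append, pvFirst_cons]
        have : ¬ pvKey a p = s' := fun hc => hs hc.symm
        simp [pvFirst, this, Option.or]
        cases List.find? (fun q => pvKey a q == s') u <;> rfl
      have hget : (st.1.insert (pvKey a p) [p.1, p.2]).get? s' = st.1.get? s' := by
        rw [PySem.Dict.get?_insert]
        simp [hs]
      rw [hfirst]
      simp only [hget]
      exact h s'
  | some pq =>
    obtain ⟨r, hr⟩ := (h (pvKey a p)).2 pq hf
    have hFs : pvFirst a (u ++ p :: v) (pvKey a p) = some pq := by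
      rw [pvFirst_append, hf]; rfl
    -- A's indexings and slice on the stored list
    have hg0 : PySem.List.pyGetD (pq.1 :: pq.2 :: r) 0 0 = pq.1 := by
      rw [PySem.List.pyGetD_ofNat']; rfl
    have hg1 : PySem.List.pyGetD (pq.1 :: pq.2 :: r) 1 0 = pq.2 := by
      rw [PySem.List.pyGetD_ofNat']; rfl
    have hsl : PySem.List.slice (pq.1 :: pq.2 :: r) none (some 2) = [pq.1, pq.2] := by
      rw [PySem.List.slice_to _ (by norm_num : (0:Int) ≤ 2)]; rfl
    -- the common candidate
    have hcond : ∀ s', s' ≠ pvKey a p →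
        pvFirst a (u ++ [p]) s' = pvFirst a u s' := by
      intro s' hs
      rw [pvFirst_append, pvFirst_cons]
      have : ¬ pvKey a p = s' := fun hc => hs hc.symm
      simp only [this, if_false]
      cases pvFirst a u s' <;> rfl
    have hkeep : pvDInv a (u ++ [p]) st.1 := by
      intro s'
      by_cases hs : s' = pvKey a p
      · subst hs
        have : pvFirst a (u ++ [p]) (pvKey a p) = some pq := by
          rw [pvFirst_append, hf]; rfl
        rw [this]
        refine ⟨?_, ?_⟩
        · intro hc; cases hc
        intro pq' hpq'
        obtain rfl : pq = pq' := by injection hpq'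
        exact ⟨r, hr⟩
      · rw [hcond s' hs]; exact h s'
    have hins : ∀ rr : List Int, pvDInv a (u ++ [p])
        (st.1.insert (pvKey a p) (pq.1 :: pq.2 :: rr)) := by
      intro rr s'
      by_cases hs : s' = pvKey a p
      · subst hs
        have : pvFirst a (u ++ [p]) (pvKey a p) = some pq := by
          rw [pvFirst_append, hf]; rfl
        rw [this]
        refine ⟨?_, ?_⟩
        · intro hc; cases hc
        intro pq' hpq'
        obtain rfl : pq = pq' := by injection hpq'
        exact ⟨rr, by rw [PySem.Dict.get?_insert]; simp⟩
      · rw [hcond s' hs]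
        have : (st.1.insert (pvKey a p) (pq.1 :: pq.2 :: rr)).get? s' = st.1.get? s' := by
          rw [PySem.Dict.get?_insert]; simp [hs]
        rw [this]; exact h s'
    by_cases hc : pq.1 ≠ p.1 ∧ pq.2 ≠ p.2 ∧ pq.1 ≠ p.2 ∧ pq.2 ≠ p.1
    · have hc' : pq.1 ≠ p.1 ∧ pq.1 ≠ p.2 ∧ pq.2 ≠ p.1 ∧ pq.2 ≠ p.2 := by tauto
      have hA : pvStepA a st p =
          (if st.2 = [] ∨ pyListLt [pq.1, pq.2, p.1, p.2] st.2 then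
            (st.1.insert (pvKey a p) [pq.1, pq.2, p.1, p.2], [pq.1, pq.2, p.1, p.2])
          else (st.1, st.2)) := by
        simp only [pvStepA, hr, hg0, hg1, hsl, if_pos hc]
        rfl
      have hB : pvStepB a (pvFirst a (u ++ p :: v)) (pvToOpt st.2) p =
          (match pvToOpt st.2 with
           | none => some [pq.1, pq.2, p.1, p.2]
           | some b => if pyListLt [pq.1, pq.2, p.1, p.2] b
                       then some [pq.1, pq.2, p.1, p.2] else some b) := by
        simp only [pvStepB, hFs, Option.getD_some, if_pos hc']
      by_cases hans : st.2 = []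
      · have hA2 : pvStepA a st p =
            (st.1.insert (pvKey a p) [pq.1, pq.2, p.1, p.2], [pq.1, pq.2, p.1, p.2]) := by
          rw [hA, if_pos (Or.inl hans)]
        refine ⟨by rw [hA2]; exact hins [p.1, p.2], ?_⟩
        rw [hA2, hB]
        simp [pvToOpt, hans]
      · by_cases hlt : pyListLt [pq.1, pq.2, p.1, p.2] st.2 = true
        · have hA2 : pvStepA a st p =
              (st.1.insert (pvKey a p) [pq.1, pq.2, p.1, p.2], [pq.1, pq.2, p.1, p.2]) := by
            rw [hA, if_pos (Or.inr hlt)]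
          refine ⟨by rw [hA2]; exact hins [p.1, p.2], ?_⟩
          rw [hA2, hB]
          simp [pvToOpt, hans, hlt]
        · have hA2 : pvStepA a st p = (st.1, st.2) := by
            rw [hA, if_neg (by simp [hans, hlt])]
          refine ⟨by rw [hA2]; exact hkeep, ?_⟩
          rw [hA2, hB]
          simp [pvToOpt, hans, hlt]
    · have hc' : ¬ (pq.1 ≠ p.1 ∧ pq.1 ≠ p.2 ∧ pq.2 ≠ p.1 ∧ pq.2 ≠ p.2) := by tauto
      have hA : pvStepA a st p = (st.1, st.2) := by
        simp only [pvStepA, hr, hg0, hg1, if_neg hc]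
      have hB : pvStepB a (pvFirst a (u ++ p :: v)) (pvToOpt st.2) p = pvToOpt st.2 := by
        simp only [pvStepB, hFs, Option.getD_some, if_neg hc']
      exact ⟨by rw [hA]; exact hkeep, by rw [hA, hB]⟩

-- Key synchronisation lemma: running A's loop and B's phase-2 loop over the same
-- suffix, from related states, yields related answers.
theorem pv_sync (a : List Int) :
    ∀ (rest u : List (Int × Int)) (st : PySem.Dict Int (List Int) × List Int),
      pvDInv a u st.1 →
      pvToOpt ((rest.foldl (pvStepA a) st).2)
        = rest.foldl (pvStepB a (pvFirst a (u ++ rest))) (pvToOpt st.2) := by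
  intro rest
  induction rest with
  | nil => intro u st _; simp
  | cons p rest ih =>
    intro u st h
    obtain ⟨h1, h2⟩ := pv_step a u rest p st h
    simp only [List.foldl_cons]
    rw [← h2]
    have hlist : u ++ p :: rest = (u ++ [p]) ++ rest := by simp
    calc pvToOpt ((rest.foldl (pvStepA a) (pvStepA a st p)).2)
        = rest.foldl (pvStepB a (pvFirst a ((u ++ [p]) ++ rest)))
            (pvToOpt ((pvStepA a st p).2)) := ih (u ++ [p]) (pvStepA a st p) h1
      _ = rest.foldl (pvStepB a (pvFirst a (u ++ p :: rest)))
            (pvToOpt ((pvStepA a st p).2)) := by rw [hlist]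

theorem satisfyEqn_spec : Claim_equal_satisfyEqn := by
  unfold Claim_equal_satisfyEqn Spec_satisfyEqn
  intro a N _
  have keyA : (PySem.List.pyRange 0 (PySem.List.len a) 1).foldl
      (fun st i => (PySem.List.pyRange (i+1) (PySem.List.len a) 1).foldl
        (fun st j => pvStepA a st (i, j)) st)
      ((PySem.Dict.empty : PySem.Dict Int (List Int)), ([] : List Int))
      = (pvPairs a).foldl (pvStepA a)
          ((PySem.Dict.empty : PySem.Dict Int (List Int)), ([] : List Int)) :=
    pv_foldl_flat _ _ _ _
  have hA : satisfyEqn a N =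
      (if ((pvPairs a).foldl (pvStepA a)
            ((PySem.Dict.empty : PySem.Dict Int (List Int)), ([] : List Int))).2 = []
       then [-1, -1, -1, -1]
       else ((pvPairs a).foldl (pvStepA a)
            ((PySem.Dict.empty : PySem.Dict Int (List Int)), ([] : List Int))).2) := by
    rw [← keyA]
    rfl
  have key1 : (PySem.List.pyRange 0 (PySem.List.len a) 1).foldl
      (fun d i => (PySem.List.pyRange (i+1) (PySem.List.len a) 1).foldl
        (fun d j => (fun (d : PySem.Dict Int (Int × Int)) (p : Int × Int) =>
          d.setdefault (pvKey a p) p) d (i, j)) d)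
      (PySem.Dict.empty : PySem.Dict Int (Int × Int))
      = (pvPairs a).foldl (fun d p => d.setdefault (pvKey a p) p)
          (PySem.Dict.empty : PySem.Dict Int (Int × Int)) :=
    pv_foldl_flat (fun i => PySem.List.pyRange (i+1) (PySem.List.len a) 1)
      (fun d p => d.setdefault (pvKey a p) p)
      (PySem.List.pyRange 0 (PySem.List.len a) 1) PySem.Dict.empty
  have key2 : ∀ F : Int → Option (Int × Int),
      (PySem.List.pyRange 0 (PySem.List.len a) 1).foldl
        (fun best i => (PySem.List.pyRange (i+1) (PySem.List.len a) 1).foldl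
          (fun best j => pvStepB a F best (i, j)) best)
        (none : Option (List Int))
      = (pvPairs a).foldl (pvStepB a F) (none : Option (List Int)) :=
    fun F => pv_foldl_flat (fun i => PySem.List.pyRange (i+1) (PySem.List.len a) 1)
      (pvStepB a F) (PySem.List.pyRange 0 (PySem.List.len a) 1) none
  have hB : satisfyEqn_alt a N =
      (match (pvPairs a).foldl
          (pvStepB a (fun s => ((pvPairs a).foldl (fun d p => d.setdefault (pvKey a p) p)
            (PySem.Dict.empty : PySem.Dict Int (Int × Int))).get? s))
          (none : Option (List Int)) with
       | none => [-1, -1, -1, -1]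
       | some b => b) := by
    rw [← key2, ← key1]
    rfl
  rw [hA, hB]
  have hfirst : (fun s => ((pvPairs a).foldl (fun d p => d.setdefault (pvKey a p) p)
      (PySem.Dict.empty : PySem.Dict Int (Int × Int))).get? s) = pvFirst a (pvPairs a) := by
    funext s
    rw [pv_pass1]
    simp [Option.or]
  rw [hfirst]
  have h0 : pvDInv a [] (PySem.Dict.empty : PySem.Dict Int (List Int)) := by
    intro s
    exact ⟨fun _ => by simp, fun pq hpq => by simp [pvFirst] at hpq⟩
  have hs := pv_sync a (pvPairs a) [] (PySem.Dict.empty, ([] : List Int)) h0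
  simp only [List.nil_append] at hs
  have hto : pvToOpt ([] : List Int) = none := rfl
  rw [hto] at hs
  cases hend : ((pvPairs a).foldl (pvStepA a)
      ((PySem.Dict.empty : PySem.Dict Int (List Int)), ([] : List Int))).2 with
  | nil =>
    rw [hend] at hs
    simp only [pvToOpt] at hs
    simp [← hs]
  | cons x xs =>
    rw [hend] at hs
    simp only [pvToOpt] at hs
    rw [if_neg (by simp)] at hs
    simp [← hs]
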